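-- pv_equiv track=rewrite | github.com/InferenceOverload/agent-dev-assistence-model | src/tools/diagram.py | mermaid_repo_tree
-- ===== SOURCE A (Python) =====
-- from typing import List, Dict
-- from collections import defaultdict
--
-- def _top_dirs(paths: List[str], max_dirs: int = 8) -> List[str]:
--     counts: Dict[str,int] = defaultdict(int)
--     for p in paths:
--         head = p.split("/", 1)[0] if "/" in p else p
--         counts[head] += 1
--     return [d for d, _ in sorted(counts.items(), key=lambda x: (-x[1], x[0]))[:max_dirs]]
--
-- def mermaid_repo_tree(paths: List[str], max_files_per_dir: int = 10) -> str:
--     if not paths: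
--         return "graph TD;\n  A[empty repo];"
--     tops = set(_top_dirs(paths))
--     groups: Dict[str, List[str]] = defaultdict(list)
--     for p in paths:
--         head = p.split("/", 1)[0] if "/" in p else p
--         key = head if head in tops else "_other"
--         groups[key].append(p)
--     lines = ["graph TD", "  root((repo))"]
--     def sanitize(label: str) -> str:
--         return label.replace("/", "_").replace(".", "_").replace("-", "_")
--     for g, files in groups.items():
--         node = sanitize(g)
--         lines.append(f"  root --> {node}[{g}/]")
--         for fp in sorted(files)[:max_files_per_dir]:
--             leaf = sanitize(fp)
--             lines.append(f"  {node} --> {leaf}({fp})")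
--     return ";\n".join(lines) + ";"
-- ===== SOURCE B (Python) =====
-- from collections import Counter
--
-- def mermaid_repo_tree(paths, max_files_per_dir=10):
--     if not paths:
--         return "graph TD;\n  A[empty repo];"
--     heads = [p.split("/", 1)[0] for p in paths]
--     cnt = Counter(heads)
--     top = set(sorted(cnt, key=lambda h: (-cnt[h], h))[:8])
--     labels = [h if h in top else "_other" for h in heads]
--
--     def sanitize(label):
--         return label.replace("/", "_").replace(".", "_").replace("-", "_")
--
--     lines = ["graph TD", "  root((repo))"]
--     seen = []
--     for lab in labels:
--         if lab in seen:
--             continue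
--         seen.append(lab)
--         node = sanitize(lab)
--         lines.append(f"  root --> {node}[{lab}/]")
--         members = sorted(p for p, l in zip(paths, labels) if l == lab)
--         for fp in members[:max_files_per_dir]:
--             lines.append(f"  {node} --> {sanitize(fp)}({fp})")
--     return ";\n".join(lines) + ";"
-- ===== Notes on version B (the rewrite author's own statement) =====
-- stated objective: alternative
-- what changed: B replaces A's two defaultdict-grouping passes and groups-dict iteration with a label-based scan: one comprehension assigns each path a label (its top head or '_other') after picking the top-8 heads from a single Counter, and the emission walks the label list with a seen-list, gathering each node's files by filtering the zipped (path, label) pairs, so no grouping dict is ever built.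
import Mathlib
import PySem

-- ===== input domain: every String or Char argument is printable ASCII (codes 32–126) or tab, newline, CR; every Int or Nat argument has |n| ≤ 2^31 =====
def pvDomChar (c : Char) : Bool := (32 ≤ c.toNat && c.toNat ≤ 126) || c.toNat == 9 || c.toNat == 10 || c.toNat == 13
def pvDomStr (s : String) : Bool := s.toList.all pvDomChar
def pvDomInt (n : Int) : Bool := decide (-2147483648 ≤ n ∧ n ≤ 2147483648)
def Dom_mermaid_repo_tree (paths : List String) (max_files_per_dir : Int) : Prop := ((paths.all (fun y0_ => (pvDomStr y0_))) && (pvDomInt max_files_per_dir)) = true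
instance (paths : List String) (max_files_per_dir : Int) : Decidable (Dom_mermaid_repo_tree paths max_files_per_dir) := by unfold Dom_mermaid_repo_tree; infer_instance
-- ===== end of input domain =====

-- B replaces A's two defaultdict-grouping passes with a label-based scan (a Counter for
-- the top-8 pick, then a per-path label list walked with a 'seen' accumulator, files
-- gathered by filtering); alternative decomposition, same return value.

-- shared helper (identical code in both Pythons): sanitize(label)
def pvSanitize (label : String) : String :=
  PySem.Str.replace (PySem.Str.replace (PySem.Str.replace label "/" "_") "." "_") "-" "_"

-- p.split("/", 1)[0]: the maximal '/'-free prefix (exact hand-port of the first split piece)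
def pvSplitHead (p : String) : String := String.ofList (p.toList.takeWhile (fun c => c ≠ '/'))

-- ===== PORT A =====
-- A's head: p.split("/", 1)[0] if "/" in p else p
def pvHeadA (p : String) : String :=
  if PySem.Str.isIn "/" p then pvSplitHead p else p

def pv_top_dirs (paths : List String) (max_dirs : Int) : List String :=
  let counts : PySem.Dict String Int :=
    paths.foldl (fun d p => d.modify (pvHeadA p) 0 (· + 1)) PySem.Dict.empty
  (PySem.List.slice (PySem.List.sorted2 counts.items (fun x => -x.2) (fun x => x.1))
    none (some max_dirs)).map (fun x => x.1)

def mermaid_repo_tree (paths : List String) (max_files_per_dir : Int) : String :=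
  if paths = [] then "graph TD;\n  A[empty repo];"
  else
    let tops : PySem.Set String := PySem.Set.ofList (pv_top_dirs paths 8)
    let groups : PySem.Dict String (List String) :=
      paths.foldl (fun d p =>
        let head := pvHeadA p
        let key := if PySem.Set.contains tops head then head else "_other"
        d.modify key [] (· ++ [p])) PySem.Dict.empty
    let lines :=
      groups.items.foldl (fun lines gf =>
        let node := pvSanitize gf.1
        let lines := lines ++ ["  root --> " ++ node ++ "[" ++ gf.1 ++ "/]"]
        (PySem.List.slice (PySem.List.sorted gf.2 (fun x => x)) none (some max_files_per_dir)).foldl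
          (fun lines fp => lines ++ ["  " ++ node ++ " --> " ++ pvSanitize fp ++ "(" ++ fp ++ ")"])
          lines)
        ["graph TD", "  root((repo))"]
    PySem.Str.join ";\n" lines ++ ";"

-- ===== PORT B =====
def mermaid_repo_tree_alt (paths : List String) (max_files_per_dir : Int) : String :=
  if paths = [] then "graph TD;\n  A[empty repo];"
  else
    let heads := paths.map pvSplitHead
    let cnt := PySem.Dict.counter heads
    -- sorted(cnt, key=...)[:8]; the (-count, name) key is injective on the keys
    let top : PySem.Set String :=
      PySem.Set.ofList (PySem.List.slice
        (PySem.List.sorted2 cnt.keys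
          (fun h => -(cnt.getD h 0)) (fun h => h)) none (some 8))
    let labels := heads.map (fun h => if PySem.Set.contains top h then h else "_other")
    let res := labels.foldl (fun (st : List String × List String) lab =>
        if st.2.contains lab then st
        else
          let node := pvSanitize lab
          let members := PySem.List.sorted
            (((paths.zip labels).filter (fun pl => pl.2 == lab)).map (fun pl => pl.1))
            (fun x => x)
          ((PySem.List.slice members none (some max_files_per_dir)).foldl
             (fun lines fp => lines ++ ["  " ++ node ++ " --> " ++ pvSanitize fp ++ "(" ++ fp ++ ")"])
             (st.1 ++ ["  root --> " ++ node ++ "[" ++ lab ++ "/]"]),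
           st.2 ++ [lab]))
      (["graph TD", "  root((repo))"], [])
    PySem.Str.join ";\n" res.1 ++ ";"

-- ===== PRECONDITION & SPEC =====
def Spec_mermaid_repo_tree (paths : List String) (max_files_per_dir : Int) (out : String) : Prop := out = mermaid_repo_tree_alt paths max_files_per_dir
instance (paths : List String) (max_files_per_dir : Int) (out : String) : Decidable (Spec_mermaid_repo_tree paths max_files_per_dir out) := by unfold Spec_mermaid_repo_tree; infer_instance

-- ===== CLAIM (what is proved, stated in full; the proofs are below) =====
def Claim_equal_mermaid_repo_tree : Prop := ∀ (paths : List String) (max_files_per_dir : Int), Dom_mermaid_repo_tree paths max_files_per_dir → Spec_mermaid_repo_tree paths max_files_per_dir (mermaid_repo_tree paths max_files_per_dir)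

-- ===== LEMMAS AND PROOFS =====

-- proofs-only abbreviations
def pvMapk (tops : PySem.Set String) (h : String) : String :=
  if PySem.Set.contains tops h then h else "_other"

def pvNodeLines (max_files_per_dir : Int) (g : String) (files : List String) : List String :=
  let node := pvSanitize g
  (PySem.List.slice (PySem.List.sorted files (fun x => x)) none (some max_files_per_dir)).foldl
    (fun chunk fp => chunk ++ ["  " ++ node ++ " --> " ++ pvSanitize fp ++ "(" ++ fp ++ ")"])
    ["  root --> " ++ node ++ "[" ++ g ++ "/]"]

def pvEmit (tops : PySem.Set String) (m : Int) (paths : List String) (k : String) : List String :=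
  pvNodeLines m k (paths.filter (fun p => pvMapk tops (pvSplitHead p) == k))

lemma pvHeadA_eq (p : String) : pvHeadA p = pvSplitHead p := by
  unfold pvHeadA pvSplitHead
  split
  · rfl
  next hin =>
    rw [List.takeWhile_eq_self_iff.mpr, String.ofList_toList]
    intro c hc
    simp only [decide_eq_true_eq]
    rintro rfl
    apply hin
    rw [PySem.Str.isIn_iff_infix]
    obtain ⟨s, t, hst⟩ := List.append_of_mem hc
    exact ⟨s, t, by simp [hst]⟩

lemma pvOfList_cons {α : Type} [BEq α] [LawfulBEq α] (x : α) (t : List α) :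
    PySem.Set.ofList (x :: t) = x :: (PySem.Set.ofList t).filter (fun y => !(y == x)) := by
  rw [PySem.Set.ofList_eq_foldl]
  have h1 : List.foldl PySem.Set.add ([] : PySem.Set α) (x :: t)
      = List.foldl PySem.Set.add [x] t := by
    simp [PySem.Set.add, PySem.Set.contains]
  rw [h1]
  have h2 : List.foldl PySem.Set.add [x] t = PySem.Set.update [x] t := rfl
  rw [h2, PySem.Set.update_eq_append_filter]
  simp only [List.singleton_append, List.cons.injEq, true_and]
  exact List.filter_congr (fun a _ => by simp [PySem.Set.contains, BEq.comm])

lemma pvFilter_ofList {α : Type} [BEq α] [LawfulBEq α] (q : α → Bool) (ys : List α) :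
    (PySem.Set.ofList ys).filter q = PySem.Set.ofList (ys.filter q) := by
  induction ys with
  | nil => simp [PySem.Set.ofList]
  | cons y t ih =>
    rw [pvOfList_cons]
    by_cases hq : q y = true
    · rw [List.filter_cons_of_pos hq, List.filter_cons_of_pos hq, pvOfList_cons, ← ih,
        List.filter_filter, List.filter_filter]
      exact congrArg _ (List.filter_congr (fun a _ => Bool.and_comm _ _))
    · rw [List.filter_cons_of_neg hq, List.filter_cons_of_neg hq, ← ih, List.filter_filter]
      apply List.filter_congr
      intro a _
      by_cases hqa : q a = true
      · have : (a == y) = false := by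
          simp only [beq_eq_false_iff_ne]; rintro rfl; exact hq hqa
        simp [hqa, this]
      · simp [Bool.eq_false_iff.mpr hqa]

lemma pvOfList_map_dedup {α β : Type} [BEq α] [LawfulBEq α] [BEq β] [LawfulBEq β]
    (f : α → β) (l : List α) :
    PySem.Set.ofList (l.map f) = PySem.Set.ofList ((PySem.Set.ofList l).map f) := by
  induction hl : l.length using Nat.strong_induction_on generalizing l with
  | _ n ih =>
  cases l with
  | nil => simp
  | cons x t =>
    rw [List.map_cons, pvOfList_cons (f x), pvOfList_cons x, List.map_cons, pvOfList_cons (f x)]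
    congr 1
    rw [pvFilter_ofList, pvFilter_ofList, List.filter_map, List.filter_map,
      List.filter_filter]
    simp only [Function.comp_def]
    have hfc : List.filter (fun a => !(f a == f x) && !(a == x))
        (PySem.Set.ofList t) = List.filter (fun a => !(f a == f x)) (PySem.Set.ofList t) := by
      apply List.filter_congr
      intro a _
      by_cases hfa : (f a == f x) = true
      · simp [hfa]
      · have hax : (a == x) = false := by
          simp only [beq_eq_false_iff_ne]; rintro rfl; exact hfa (by simp)
        simp [Bool.eq_false_iff.mpr hfa, hax]
    rw [hfc, pvFilter_ofList (fun a => !(f a == f x)) t]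
    have hlen : (List.filter (fun a => !(f a == f x)) t).length < n := by
      have := List.length_filter_le (fun a => !(f a == f x)) t
      simp at hl; omega
    exact ih _ hlen _ rfl

lemma pvInsertBy_map {α β : Type} (f : α → β) (bb : β → β → Bool) (ba : α → α → Bool)
    (h : ∀ a b, bb (f a) (f b) = ba a b) (l : List α) (x : α) :
    PySem.List.insertBy bb (f x) (l.map f) = (PySem.List.insertBy ba x l).map f := by
  induction l with
  | nil => simp [PySem.List.insertBy]
  | cons y ys ih =>
    simp only [List.map_cons, PySem.List.insertBy, h]
    by_cases hb : ba x y = true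
    · simp [hb]
    · simp [Bool.eq_false_iff.mpr hb, ih]

lemma pvFoldl_insertBy_map {α β : Type} (f : α → β) (bb : β → β → Bool) (ba : α → α → Bool)
    (h : ∀ a b, bb (f a) (f b) = ba a b) (l : List α) :
    ∀ acc : List α,
      (l.map f).foldl (fun acc x => PySem.List.insertBy bb x acc) (acc.map f)
        = (l.foldl (fun acc x => PySem.List.insertBy ba x acc) acc).map f := by
  induction l with
  | nil => intro acc; rfl
  | cons y ys ih =>
    intro acc
    simp only [List.map_cons, List.foldl_cons]
    rw [pvInsertBy_map f bb ba h acc y]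
    exact ih _

lemma pvSorted2_map {α β : Type} (f : α → β) (k1 : β → Int) (k2 : β → String) (l : List α) :
    PySem.List.sorted2 (l.map f) k1 k2 =
      (PySem.List.sorted2 l (fun a => k1 (f a)) (fun a => k2 (f a))).map f := by
  simp only [PySem.List.sorted2]
  exact pvFoldl_insertBy_map f _ _ (fun a b => rfl) l ([])

lemma pvSlice_map {α β : Type} (f : α → β) (l : List α) (m : Int) :
    PySem.List.slice (l.map f) none (some m) = (PySem.List.slice l none (some m)).map f := by
  simp [PySem.List.slice, List.map_take]

-- B's seen-guarded scan = a flatMap over the distinct labels in first-occurrence order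
lemma pvSeenFold {α : Type} [BEq α] [LawfulBEq α] (g : α → List String) :
    ∀ (xs : List α) (acc : List String) (seen : List α),
      (xs.foldl (fun (st : List String × List α) x =>
          if st.2.contains x then st else (st.1 ++ g x, st.2 ++ [x])) (acc, seen)).1
        = acc ++ ((PySem.Set.ofList xs).filter (fun x => !seen.contains x)).flatMap g := by
  intro xs
  induction xs with
  | nil => intro acc seen; simp
  | cons x t ih =>
    intro acc seen
    simp only [List.foldl_cons]
    rw [pvOfList_cons, List.filter_cons]
    by_cases hc : seen.contains x = true
    · have hx : x ∈ seen := by simpa using hc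
      rw [if_pos hc, if_neg (by simp [hx]), ih, List.filter_filter]
      congr 2
      apply List.filter_congr
      intro a _
      by_cases hax : a = x
      · subst hax; simp [hx]
      · simp [hax]
    · have hx : x ∉ seen := by simpa using hc
      rw [if_neg hc, if_pos (by simp [hx]), ih, List.flatMap_cons]
      have hF : List.filter (fun a => !(seen ++ [x]).contains a) (PySem.Set.ofList t)
          = List.filter (fun a => !seen.contains a)
              (List.filter (fun y => !(y == x)) (PySem.Set.ofList t)) := by
        rw [List.filter_filter]
        apply List.filter_congr
        intro a _
        by_cases hax : a = x
        · subst hax; simp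
        · simp [hax]
      rw [hF]
      simp [List.append_assoc]

-- the inner file loop of either port builds pvNodeLines appended to the running lines
lemma pvBodyLines (m : Int) (lines : List String) (g : String) (files : List String) :
    (List.foldl (fun lines fp => lines ++
        ["  " ++ pvSanitize g ++ " --> " ++ pvSanitize fp ++ "(" ++ fp ++ ")"])
      (lines ++ ["  root --> " ++ pvSanitize g ++ "[" ++ g ++ "/]"])
      (PySem.List.slice (PySem.List.sorted files fun x => x) none (some m)))
    = lines ++ pvNodeLines m g files := by
  unfold pvNodeLines
  dsimp only
  rw [PySem.List.foldl_append_singleton_eq_map, PySem.List.foldl_append_singleton_eq_map]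
  simp [List.append_assoc]

-- members-by-zip-filter = A's per-key group
lemma pvZipFilter (f : String → String) (paths : List String) (k : String) :
    (((paths.zip (paths.map f)).filter (fun pl => pl.2 == k)).map (fun pl => pl.1))
      = paths.filter (fun p => f p == k) := by
  induction paths with
  | nil => rfl
  | cons p t ih =>
    simp only [List.map_cons, List.zip_cons_cons, List.filter_cons]
    by_cases h : (f p == k) = true
    · simp [h, ih]
    · simp [h, ih]

-- ===== VERDICT (by name: the statement is the Claim_ definition above) =====
theorem mermaid_repo_tree_spec : Claim_equal_mermaid_repo_tree := by
  intro paths m _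
  unfold Spec_mermaid_repo_tree mermaid_repo_tree mermaid_repo_tree_alt
  by_cases hp : paths = []
  · simp [hp]
  · rw [if_neg hp, if_neg hp]
    dsimp only
    simp only [PySem.Dict.keys_counter, PySem.Dict.getD_counter]
    set heads := paths.map pvSplitHead with hheads
    -- the top-dir list: both ports compute the same canonical sorted slice
    have topdirs : pv_top_dirs paths 8 = PySem.List.slice
        (PySem.List.sorted2 (PySem.Set.ofList heads)
          (fun h => -((heads.count h : Nat) : Int)) (fun h => h)) none (some 8) := by
      unfold pv_top_dirs
      dsimp only
      have hc : (List.foldl (fun d p => d.modify (pvHeadA p) 0 (· + 1)) PySem.Dict.empty paths)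
          = PySem.Dict.counter heads := by
        simp only [pvHeadA_eq]
        rw [PySem.Dict.counter_eq_foldl, hheads, List.foldl_map]
      rw [hc, PySem.Dict.items_counter,
        pvSorted2_map (fun k => (k, ((heads.count k : Nat) : Int))) _ _,
        pvSlice_map, List.map_map]
      simp [Function.comp_def]
    rw [topdirs]
    set tops := PySem.Set.ofList (PySem.List.slice
        (PySem.List.sorted2 (PySem.Set.ofList heads)
          (fun h => -((heads.count h : Nat) : Int)) (fun h => h)) none (some 8)) with htops
    simp only [pvHeadA_eq]
    -- A side: groups dict → flatMap over distinct mapped heads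
    have hbody : (fun (d : PySem.Dict String (List String)) p =>
          d.modify (if PySem.Set.contains tops (pvSplitHead p) = true then pvSplitHead p
            else "_other") [] fun x => x ++ [p])
        = (fun d p => d.modify (pvMapk tops (pvSplitHead p)) [] fun x => x ++ [p]) := rfl
    rw [hbody]
    set gA := List.foldl (fun (d : PySem.Dict String (List String)) p =>
      d.modify (pvMapk tops (pvSplitHead p)) [] fun x => x ++ [p]) PySem.Dict.empty paths with hgA
    have hfoldA : gA = List.foldl (fun d (q : String × String) => d.modify q.1 [] fun v => v ++ [q.2])
        PySem.Dict.empty (paths.map (fun p => (pvMapk tops (pvSplitHead p), p))) := by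
      rw [List.foldl_map]
    have keysA : gA.keys = PySem.Set.ofList (heads.map (pvMapk tops)) := by
      rw [hgA, PySem.Dict.keys_foldl_modify_key paths (fun p => pvMapk tops (pvSplitHead p)) []
        (fun _ p => fun v => v ++ [p]) PySem.Dict.empty, PySem.Dict.keys_empty,
        PySem.Set.update_nil_left, hheads, List.map_map]
      rfl
    have getDA : ∀ h, gA.getD h [] = paths.filter (fun p => pvMapk tops (pvSplitHead p) == h) := by
      intro h
      rw [hfoldA, PySem.Dict.getD_foldl_modify_append, PySem.Dict.getD_empty]
      simp [List.filter_map, Function.comp_def]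
    have ndA : gA.keys.Nodup := by rw [keysA]; exact PySem.Set.nodup_ofList _
    have itemsA : gA.items = (PySem.Set.ofList (heads.map (pvMapk tops))).map
        (fun k => (k, paths.filter (fun p => pvMapk tops (pvSplitHead p) == k))) := by
      rw [PySem.Dict.items_eq_map_keys gA ndA [], keysA]
      exact List.map_congr_left (fun k _ => by rw [getDA])
    have stepA := PySem.List.foldl_congr_mem gA.items
      (fun lines (gf : String × List String) => List.foldl (fun lines fp => lines ++
          ["  " ++ pvSanitize gf.1 ++ " --> " ++ pvSanitize fp ++ "(" ++ fp ++ ")"])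
        (lines ++ ["  root --> " ++ pvSanitize gf.1 ++ "[" ++ gf.1 ++ "/]"])
        (PySem.List.slice (PySem.List.sorted gf.2 fun x => x) none (some m)))
      (fun lines gf => lines ++ pvNodeLines m gf.1 gf.2)
      ["graph TD", "  root((repo))"]
      (fun acc gf _ => pvBodyLines m acc gf.1 gf.2)
    rw [stepA, PySem.List.foldl_append_eq_flatMap, itemsA, List.flatMap_map]
    -- B side: labels = heads.map (pvMapk tops); the seen-fold → the same flatMap
    have hlabels : heads.map (fun h => if PySem.Set.contains tops h = true then h else "_other")
        = heads.map (pvMapk tops) := rfl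
    rw [hlabels]
    set labels := heads.map (pvMapk tops) with hlabdef
    have hzl : paths.zip labels
        = paths.zip (paths.map (fun p => pvMapk tops (pvSplitHead p))) := by
      rw [hlabdef, hheads, List.map_map]; rfl
    have hstep : (fun (st : List String × List String) lab =>
        if st.2.contains lab then st
        else
          ((PySem.List.slice (PySem.List.sorted
              (((paths.zip labels).filter (fun pl => pl.2 == lab)).map (fun pl => pl.1))
              (fun x => x)) none (some m)).foldl
             (fun lines fp => lines ++
               ["  " ++ pvSanitize lab ++ " --> " ++ pvSanitize fp ++ "(" ++ fp ++ ")"])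
             (st.1 ++ ["  root --> " ++ pvSanitize lab ++ "[" ++ lab ++ "/]"]),
           st.2 ++ [lab]))
        = (fun (st : List String × List String) lab =>
            if st.2.contains lab then st else (st.1 ++ pvEmit tops m paths lab, st.2 ++ [lab])) := by
      funext st lab
      by_cases hc : st.2.contains lab = true
      · rw [if_pos hc, if_pos hc]
      · rw [if_neg hc, if_neg hc]
        have hmem : (((paths.zip labels).filter (fun pl => pl.2 == lab)).map (fun pl => pl.1))
            = paths.filter (fun p => pvMapk tops (pvSplitHead p) == lab) := by
          rw [hzl, pvZipFilter]
        rw [hmem]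
        exact Prod.ext (pvBodyLines m st.1 lab _) rfl
    rw [hstep, pvSeenFold (pvEmit tops m paths) labels ["graph TD", "  root((repo))"] []]
    simp only [List.contains_nil, Bool.not_false, List.filter_true]
    rw [hlabdef, pvOfList_map_dedup (pvMapk tops) heads]
    rfl
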